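-- pv_equiv track=rewrite | github.com/lewinskie254/apps | coffeeCalc.py | getCostOfCoffee
-- ===== SOURCE A (Python) =====
-- def getCostOfCoffee(cups, costPerCup):
--     total = 0
--
--     for i in range(cups):
--         cup = i + 1
--         cost = costPerCup
--         if cup % 8 == 0:
--             cost = 0
--         else:
--             cost = costPerCup
--
--         total += cost
--
--     return total
-- ===== SOURCE B (Python) =====
-- def getCostOfCoffee(cups, costPerCup):
--     n = max(cups, 0)
--     return (n - n // 8) * costPerCup
-- ===== Notes on version B (the rewrite author's own statement) =====
-- stated objective: faster
-- what changed: Replaces the per-cup loop with the closed form (n - n//8)*costPerCup where n = max(cups, 0), since exactly every 8th cup is free.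
import Mathlib
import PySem

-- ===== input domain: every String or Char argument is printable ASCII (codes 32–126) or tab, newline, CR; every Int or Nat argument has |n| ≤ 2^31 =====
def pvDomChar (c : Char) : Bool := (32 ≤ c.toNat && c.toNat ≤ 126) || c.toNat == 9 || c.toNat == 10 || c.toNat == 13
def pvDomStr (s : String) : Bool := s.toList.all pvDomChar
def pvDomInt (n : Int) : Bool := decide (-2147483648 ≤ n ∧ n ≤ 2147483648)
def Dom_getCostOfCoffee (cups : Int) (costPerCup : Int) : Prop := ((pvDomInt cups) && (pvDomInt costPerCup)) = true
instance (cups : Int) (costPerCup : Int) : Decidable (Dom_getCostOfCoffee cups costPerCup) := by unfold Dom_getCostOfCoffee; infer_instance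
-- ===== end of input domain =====

-- B replaces A's per-cup loop by the closed form (n - n//8) * costPerCup (every 8th cup free): O(1) instead of O(n).


-- ===== PORT A =====
def getCostOfCoffee (cups : Int) (costPerCup : Int) : Int :=
  (PySem.List.pyRange 0 cups 1).foldl
    (fun total i =>
      let cup := i + 1
      let cost := if PySem.Int.mod cup 8 = 0 then (0 : Int) else costPerCup
      total + cost)
    0

-- ===== PORT B =====
def getCostOfCoffee_alt (cups : Int) (costPerCup : Int) : Int :=
  let n := max cups 0
  (n - PySem.Int.floordiv n 8) * costPerCup

-- ===== PRECONDITION & SPEC =====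
def Spec_getCostOfCoffee (cups : Int) (costPerCup : Int) (out : Int) : Prop := out = getCostOfCoffee_alt cups costPerCup
instance (cups : Int) (costPerCup : Int) (out : Int) : Decidable (Spec_getCostOfCoffee cups costPerCup out) := by unfold Spec_getCostOfCoffee; infer_instance

-- ===== CLAIM (what is proved, stated in full; the proofs are below) =====
def Claim_equal_getCostOfCoffee : Prop := ∀ (cups : Int) (costPerCup : Int), Dom_getCostOfCoffee cups costPerCup → Spec_getCostOfCoffee cups costPerCup (getCostOfCoffee cups costPerCup)

-- ===== LEMMAS AND PROOFS =====

theorem getCost_loop_nat (n : Nat) (c : Int) :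
    (PySem.List.pyRange 0 (n : Int) 1).foldl
      (fun total i =>
        let cup := i + 1
        let cost := if PySem.Int.mod cup 8 = 0 then (0 : Int) else c
        total + cost) 0
    = ((n : Int) - ((n / 8 : Nat) : Int)) * c := by
  induction n with
  | zero => simp [PySem.List.pyRange_one_eq_nil]
  | succ m ih =>
    have h : ((m + 1 : Nat) : Int) = (m : Int) + 1 := by push_cast; ring
    rw [h, PySem.List.pyRange_one_succ_right (by positivity)]
    rw [List.foldl_append, ih]
    simp only [List.foldl_cons, List.foldl_nil]
    have hm : PySem.Int.mod ((m : Int) + 1) 8 = (((m + 1) % 8 : Nat) : Int) := by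
      rw [show ((m : Int) + 1) = ((m + 1 : Nat) : Int) by push_cast; ring]
      exact PySem.Int.mod_natCast (m + 1) 8
    rw [hm]
    by_cases h8 : (m + 1) % 8 = 0
    · have hdiv : (m + 1) / 8 = m / 8 + 1 := by omega
      rw [if_pos (by exact_mod_cast h8)]
      push_cast [hdiv]
      ring
    · have hdiv : (m + 1) / 8 = m / 8 := by omega
      have hne : (((m + 1) % 8 : Nat) : Int) ≠ 0 := by exact_mod_cast h8
      rw [if_neg hne]
      push_cast [hdiv]
      ring

-- ===== VERDICT (by name: the statement is the Claim_ definition above) =====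
theorem getCostOfCoffee_spec : Claim_equal_getCostOfCoffee := by
  intro cups costPerCup _
  unfold Spec_getCostOfCoffee getCostOfCoffee getCostOfCoffee_alt
  by_cases hc : cups ≤ 0
  · rw [PySem.List.pyRange_one_eq_nil hc]
    have hmax : max cups 0 = 0 := by omega
    simp [hmax, PySem.Int.floordiv]
  · rw [not_le] at hc
    have hmax : max cups 0 = cups := by omega
    obtain ⟨m, hm⟩ : ∃ m : Nat, cups = (m : Int) := ⟨cups.toNat, by omega⟩
    subst hm
    rw [hmax, getCost_loop_nat m costPerCup]
    have hfd : PySem.Int.floordiv (m : Int) 8 = ((m / 8 : Nat) : Int) := by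
      exact_mod_cast PySem.Int.floordiv_natCast m 8
    show ((m : Int) - ((m / 8 : Nat) : Int)) * costPerCup
        = ((m : Int) - PySem.Int.floordiv (m : Int) 8) * costPerCup
    rw [hfd]
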